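-- pv_equiv track=rewrite | github.com/darboledas/criptoclasica | polyalphabetic/recomponer_subtextos.py | recomponer
-- ===== SOURCE A (Python) =====
-- def recomponer(lines):
--     """Intercala los subtextos para reconstruir el criptograma."""
--     lines = [line.strip() for line in lines]
--     if not lines:
--         return ""
--
--     max_len = max(len(line) for line in lines)
--     n = len(lines)
--
--     resultado = []
--     for i in range(max_len):
--         for j in range(n):
--             if i < len(lines[j]):
--                 resultado.append(lines[j][i])
--
--     return "".join(resultado)
-- ===== SOURCE B (Python) =====
-- def recomponer(lines):
--     """Intercala los subtextos para reconstruir el criptograma."""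
--     stripped = [line.strip() for line in lines]
--     m = 0
--     for s in stripped:
--         m = max(m, len(s))
--     cols = [[] for _ in range(m)]
--     for s in stripped:
--         for i, c in enumerate(s):
--             cols[i].append(c)
--     return "".join("".join(col) for col in cols)
-- ===== Notes on version B (the rewrite author's own statement) =====
-- stated objective: alternative
-- what changed: Instead of scanning all n lines once per column (column-major nested loops with per-column length tests), B makes one row-major pass over each line's characters, distributing them into per-column buckets that are concatenated at the end; it trades A's repeated line rescans for bucket bookkeeping.
import Mathlib
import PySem

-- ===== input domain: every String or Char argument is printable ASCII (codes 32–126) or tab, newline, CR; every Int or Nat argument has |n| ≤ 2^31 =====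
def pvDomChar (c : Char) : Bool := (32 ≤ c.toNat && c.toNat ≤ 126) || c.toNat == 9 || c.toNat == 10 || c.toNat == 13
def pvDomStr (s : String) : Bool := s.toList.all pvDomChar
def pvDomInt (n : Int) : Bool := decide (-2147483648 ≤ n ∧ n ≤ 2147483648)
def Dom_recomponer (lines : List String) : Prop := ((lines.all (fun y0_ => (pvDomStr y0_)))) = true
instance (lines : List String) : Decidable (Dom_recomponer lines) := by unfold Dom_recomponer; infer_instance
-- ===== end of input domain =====

-- B makes one row-major pass, bucketing characters by column, instead of A's column-by-column rescan of all lines.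

-- ===== PORT A =====
-- literal port: strip all lines; if empty return ""; max of lengths; for i in range(max_len):
-- for j in range(n): if i < len(lines[j]): append lines[j][i].  lines[j] has j in range, so pyGetD
-- with default "" is exact; s[i] is in range under the guard, so Option.toList of pyGet? is exact;
-- "".join of the collected single characters is String.ofList.
def recomponer (lines : List String) : String :=
  let stripped := lines.map PySem.Str.strip
  if stripped = [] then "" else
    match PySem.List.max? (stripped.map (fun l => (PySem.Str.len l : Int))) (fun x => x) with
    | none => ""   -- unreachable: stripped ≠ []
    | some maxLen =>
      let n : Int := stripped.length
      let resultado := (PySem.List.pyRange 0 maxLen 1).foldl (fun acc i =>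
        (PySem.List.pyRange 0 n 1).foldl (fun acc j =>
          let s := PySem.List.pyGetD stripped j ""
          if i < (PySem.Str.len s : Int) then
            acc ++ (PySem.Str.pyGet? s i).toList
          else acc) acc) ([] : List Char)
      String.ofList resultado

-- ===== PORT B =====
-- 'for i, c in enumerate(s): cols[i].append(c)' — structural recursion along cols and s
def stepB : List (List Char) → List Char → List (List Char)
  | cols, [] => cols
  | [], _ => []
  | c :: cs, x :: xs => (c ++ [x]) :: stepB cs xs

-- literal port of Source B: strip; running max of lengths; '[[] for _ in range(m)]'; bucket every
-- character of every line; flatten the buckets ("".join of the joined columns = String.ofList of flatten).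
def recomponer_alt (lines : List String) : String :=
  let stripped := lines.map (fun l => (PySem.Str.strip l).toList)
  let m : Int := stripped.foldl (fun acc s => max acc (s.length : Int)) 0
  let cols := stripped.foldl stepB ((PySem.List.pyRange 0 m 1).map (fun _ => ([] : List Char)))
  String.ofList cols.flatten

-- ===== PRECONDITION & SPEC =====
def Spec_recomponer (lines : List String) (out : String) : Prop := out = recomponer_alt lines
instance (lines : List String) (out : String) : Decidable (Spec_recomponer lines out) := by unfold Spec_recomponer; infer_instance

-- ===== CLAIM =====
def Claim_equal_recomponer : Prop := ∀ (lines : List String), Dom_recomponer lines → Spec_recomponer lines (recomponer lines)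

-- ===== LEMMAS AND PROOFS =====

-- the canonical value both ports reduce to: column i is the i-th character of every long-enough line
def colOf (Ls : List (List Char)) (i : Nat) : List Char :=
  Ls.flatMap (fun s => (s[i]?).toList)

def maxLenOf (Ls : List (List Char)) : Nat :=
  Ls.foldl (fun a s => max a s.length) 0

def canon (Ls : List (List Char)) : List Char :=
  (List.range (maxLenOf Ls)).flatMap (colOf Ls)

lemma stepB_length (cols : List (List Char)) (s : List Char) :
    (stepB cols s).length = cols.length := by
  induction cols generalizing s with
  | nil => cases s <;> simp [stepB]
  | cons c cs ih => cases s <;> simp [stepB, ih]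

lemma stepB_getElem (cols : List (List Char)) (s : List Char) (k : Nat) (hk : k < cols.length) :
    (stepB cols s)[k]'(by rw [stepB_length]; exact hk) = cols[k] ++ (s[k]?).toList := by
  induction cols generalizing s k with
  | nil => simp at hk
  | cons c cs ih =>
    cases s with
    | nil => simp [stepB]
    | cons x xs =>
      cases k with
      | zero => simp [stepB]
      | succ k => simpa [stepB] using ih xs k (by simpa using hk)

lemma foldl_stepB_length (Ls : List (List Char)) (cols : List (List Char)) :
    (Ls.foldl stepB cols).length = cols.length := by
  induction Ls generalizing cols with
  | nil => rfl
  | cons s Ls ih => simp [List.foldl_cons, ih, stepB_length]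

lemma foldl_stepB_getElem (Ls : List (List Char)) (cols : List (List Char)) (k : Nat)
    (hk : k < cols.length) :
    (Ls.foldl stepB cols)[k]'(by rw [foldl_stepB_length]; exact hk)
      = cols[k] ++ colOf Ls k := by
  induction Ls generalizing cols with
  | nil => simp [colOf]
  | cons s Ls ih =>
    have hk' : k < (stepB cols s).length := by rw [stepB_length]; exact hk
    simp only [List.foldl_cons]
    rw [ih (stepB cols s) hk', stepB_getElem cols s k hk]
    simp [colOf, List.append_assoc]

-- the running Int maximum of lengths is the Nat one, cast
lemma foldl_max_cast (Ls : List (List Char)) (a : Nat) :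
    Ls.foldl (fun acc s => max acc (s.length : Int)) (a : Int)
      = ((Ls.foldl (fun a s => max a s.length) a : Nat) : Int) := by
  induction Ls generalizing a with
  | nil => rfl
  | cons s Ls ih =>
    simp only [List.foldl_cons]
    rw [show (max (a : Int) (s.length : Int)) = ((max a s.length : Nat) : Int) by push_cast; rfl, ih]

-- B's port computes canon
lemma alt_eq_canon (lines : List String) :
    recomponer_alt lines = String.ofList (canon (lines.map (fun l => (PySem.Str.strip l).toList))) := by
  unfold recomponer_alt canon
  set Ls := lines.map (fun l => (PySem.Str.strip l).toList) with hLs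
  have hm : Ls.foldl (fun acc s => max acc (s.length : Int)) 0 = ((maxLenOf Ls : Nat) : Int) :=
    foldl_max_cast Ls 0
  simp only [hm]
  have hrange : PySem.List.pyRange 0 ((maxLenOf Ls : Nat) : Int) 1
      = List.map (fun k : Nat => (k : Int)) (List.range (maxLenOf Ls)) := by
    simp [PySem.List.pyRange_one]
  rw [hrange, List.map_map]
  have hinit : ((List.range (maxLenOf Ls)).map ((fun _ => ([] : List Char)) ∘ (fun k : Nat => (k : Int))))
      = List.replicate (maxLenOf Ls) ([] : List Char) := by
    simp [Function.comp_def, List.map_const']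
  rw [hinit]
  have hlen : (Ls.foldl stepB (List.replicate (maxLenOf Ls) ([] : List Char))).length
      = maxLenOf Ls := by rw [foldl_stepB_length]; simp
  have hcols : Ls.foldl stepB (List.replicate (maxLenOf Ls) ([] : List Char))
      = (List.range (maxLenOf Ls)).map (colOf Ls) := by
    apply List.ext_getElem
    · simp [hlen]
    · intro k hk1 hk2
      have hk : k < (List.replicate (maxLenOf Ls) ([] : List Char)).length := by
        simpa using hlen ▸ hk1
      rw [foldl_stepB_getElem Ls _ k hk]
      simp
  rw [hcols, List.flatMap_def]

-- the inner loop of A appends column k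
lemma innerA (stripped : List String) (k : Nat) (acc : List Char) :
    (PySem.List.pyRange 0 (stripped.length : Int) 1).foldl (fun acc j =>
        let s := PySem.List.pyGetD stripped j ""
        if (k : Int) < (PySem.Str.len s : Int) then
          acc ++ (PySem.Str.pyGet? s (k : Int)).toList
        else acc) acc
      = acc ++ colOf (stripped.map (·.toList)) k := by
  have h1 := PySem.List.foldl_pyRange_zero_pyGetD' stripped ""
      (fun acc s => if (k : Int) < (PySem.Str.len s : Int) then
          acc ++ (PySem.Str.pyGet? s (k : Int)).toList else acc) acc
  rw [h1]
  have h2 : ∀ (acc : List Char) (s : String),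
      (if (k : Int) < (PySem.Str.len s : Int) then
          acc ++ (PySem.Str.pyGet? s (k : Int)).toList else acc)
        = acc ++ (s.toList[k]?).toList := by
    intro acc s
    by_cases hkl : k < s.toList.length
    · simp
    · have h : s.toList[k]? = none := by simpa using hkl
      simp [h]
  simp only [h2]
  rw [PySem.List.foldl_append_eq_flatMap (fun s => (s.toList[k]?).toList) stripped acc]
  simp [colOf, List.flatMap_map]  -- colOf unfolds on the RHS

-- A's port computes canon as well
lemma a_eq_canon (lines : List String) :
    recomponer lines = String.ofList (canon (lines.map (fun l => (PySem.Str.strip l).toList))) := by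
  cases lines with
  | nil => simp [recomponer, canon, maxLenOf, String.ofList_nil]
  | cons l0 ls =>
    unfold recomponer
    simp only [List.map_cons, if_neg (by simp : ¬ (PySem.Str.strip l0 :: ls.map PySem.Str.strip = []))]
    rw [PySem.List.max?_id_cons]
    set stripped := PySem.Str.strip l0 :: ls.map PySem.Str.strip with hstr
    set Ls := (l0 :: ls).map (fun l => (PySem.Str.strip l).toList) with hLs
    have hLs' : Ls = stripped.map (·.toList) := by simp [hLs, hstr]
    -- the max over the mapped lengths equals maxLenOf Ls (cast)
    have hstep : ∀ (t : List String) (a : Nat),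
        (t.map (fun l => PySem.Str.len l)).foldl max (a : Int)
          = (((t.map (fun x => x.toList)).foldl (fun a s => max a s.length) a : Nat) : Int) := by
      intro t
      induction t with
      | nil => intro a; rfl
      | cons x xs ih =>
        intro a
        simp only [List.map_cons, List.foldl_cons]
        rw [show PySem.Str.len x = ((x.toList.length : Nat) : Int) by simp,
          show (max (a : Int) (x.toList.length : Int)) = ((max a x.toList.length : Nat) : Int) by
            push_cast; rfl, ih]
    have hmax : ((ls.map PySem.Str.strip).map (fun l => PySem.Str.len l)).foldl max
        (PySem.Str.len (PySem.Str.strip l0)) = ((maxLenOf Ls : Nat) : Int) := by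
      rw [show PySem.Str.len (PySem.Str.strip l0)
            = (((PySem.Str.strip l0).toList.length : Nat) : Int) by simp,
        hstep (ls.map PySem.Str.strip) (PySem.Str.strip l0).toList.length]
      have hnat : ((ls.map PySem.Str.strip).map (fun x => x.toList)).foldl
            (fun a s => max a s.length) (PySem.Str.strip l0).toList.length = maxLenOf Ls := by
        simp [maxLenOf, hLs, List.map_map, Function.comp_def, List.foldl_cons]
      rw [hnat]
    rw [hmax]
    have hrange : PySem.List.pyRange 0 ((maxLenOf Ls : Nat) : Int) 1
        = List.map (fun k : Nat => (k : Int)) (List.range (maxLenOf Ls)) := by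
      simp [PySem.List.pyRange_one]
    simp only [hrange, List.foldl_map]
    have houter : ∀ (R : List Nat) (acc : List Char),
        R.foldl (fun (acc : List Char) (k : Nat) =>
          (PySem.List.pyRange 0 (stripped.length : Int) 1).foldl (fun acc j =>
            let s := PySem.List.pyGetD stripped j ""
            if (k : Int) < (PySem.Str.len s : Int) then
              acc ++ (PySem.Str.pyGet? s (k : Int)).toList
            else acc) acc) acc
          = acc ++ R.flatMap (colOf Ls) := by
      intro R
      induction R with
      | nil => intro acc; simp
      | cons k R ih =>
        intro acc
        simp only [List.foldl_cons, List.flatMap_cons]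
        rw [innerA stripped k acc, ih, hLs', List.append_assoc]
    have := houter (List.range (maxLenOf Ls)) []
    simp only [List.nil_append] at this
    rw [this]
    rfl

-- ===== VERDICT =====
theorem recomponer_spec : Claim_equal_recomponer := by
  intro lines _
  unfold Spec_recomponer
  rw [alt_eq_canon, a_eq_canon]
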